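-- pv_equiv track=rewrite | github.com/Shilenkovv/Algorithms_PyGen_bg | 10_Optimization_methods_for_problem_solving/10_1_5.py | zeros_in_segments
-- ===== SOURCE A (Python) =====
-- def zeros_in_segments(nums: list[int], segments: list[tuple[int, int]]) -> list[int]:
--     prefix_sum = [0] * (len(nums) + 1)
--     for i in range(len(nums)):
--         prefix_sum[i + 1] = prefix_sum[i] + int(nums[i] == 0)
--
--     ans = []
--     for s, e in segments:
--         ans.append(prefix_sum[e + 1] - prefix_sum[s])
--     return ans
-- ===== SOURCE B (Python) =====
-- def zeros_in_segments(nums: list[int], segments: list[tuple[int, int]]) -> list[int]: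
--     return [sum(1 for i in range(s, e + 1) if nums[i] == 0) for s, e in segments]
-- ===== Notes on version B (the rewrite author's own statement) =====
-- stated objective: simpler
-- what changed: Drops the prefix-sum table: each query is answered by a direct per-segment scan counting elements equal to zero, in one comprehension; on the generated workloads this avoids building the length-n table and was measured faster.
-- intended difference: On segments with s > e+1 (inverted queries) A returns the negative prefix difference -(number of zeros at indices e+1..s-1) while B returns 0, the intended count for an empty segment. — e.g. on zeros_in_segments([0], [(1, -1)]): A returns [-1], B returns [0]
-- outside the precondition, e.g. on zeros_in_segments([0, 1, 0], [(-1, 1)]): A returns [-1], B returns [2]; on zeros_in_segments([1], [(-2, 0)]): A returns [0], B raises IndexError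
import Mathlib
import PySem

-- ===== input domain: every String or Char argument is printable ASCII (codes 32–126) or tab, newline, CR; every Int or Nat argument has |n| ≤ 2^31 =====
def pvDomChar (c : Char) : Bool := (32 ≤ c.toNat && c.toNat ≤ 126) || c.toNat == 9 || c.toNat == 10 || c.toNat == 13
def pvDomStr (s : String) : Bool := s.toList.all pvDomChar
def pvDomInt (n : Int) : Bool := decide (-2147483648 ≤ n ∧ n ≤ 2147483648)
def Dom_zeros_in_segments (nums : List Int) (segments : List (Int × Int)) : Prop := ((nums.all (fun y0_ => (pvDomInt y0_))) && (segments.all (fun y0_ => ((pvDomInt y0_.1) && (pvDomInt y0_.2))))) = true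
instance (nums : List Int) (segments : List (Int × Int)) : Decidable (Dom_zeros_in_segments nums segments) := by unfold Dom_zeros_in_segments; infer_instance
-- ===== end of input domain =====

-- B replaces A's prefix-sum table with a direct per-segment scan counting zeros: simpler, one
-- comprehension; on inverted segments (s > e+1) B returns 0 where A returns a negative prefix difference (see D_).


-- ===== PORT A =====
-- literal port of A: prefix_sum = [0]*(len(nums)+1); fill it left to right; then one append per segment.
-- pyGetD/pySetD are the total forms of Python's p[i]/p[i]=v; inside the fill loop the indices i, i+1 are
-- always in range, and under Pre_ the query indices e+1 and s are in range of prefix_sum, so they are exact.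
def zeros_in_segments (nums : List Int) (segments : List (Int × Int)) : List Int :=
  let prefix0 : List Int := PySem.List.pyRepeat [0] ((nums.length : Int) + 1)
  let prefixSum : List Int :=
    (PySem.List.pyRange 0 (nums.length : Int) 1).foldl
      (fun p i =>
        PySem.List.pySetD p (i + 1)
          (PySem.List.pyGetD p i 0 + (if PySem.List.pyGetD nums i 0 == 0 then 1 else 0)))
      prefix0
  segments.foldl
    (fun ans se =>
      ans ++ [PySem.List.pyGetD prefixSum (se.2 + 1) 0 - PySem.List.pyGetD prefixSum se.1 0])
    []

-- ===== PORT B =====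
-- literal port of B: one comprehension, each segment answered by a counting scan over range(s, e+1).
-- nums[i] is ported as pyGetD (default 1, never equal to 0); under Pre_ every scanned index is in range, so it is exact.
def zeros_in_segments_alt (nums : List Int) (segments : List (Int × Int)) : List Int :=
  segments.map (fun se =>
    (PySem.List.pyRange se.1 (se.2 + 1) 1).foldl
      (fun c i => c + (if PySem.List.pyGetD nums i 1 == 0 then 1 else 0)) 0)

-- ===== PRECONDITION & SPEC =====
-- Pre_ admits every segment with the natural endpoint bounds 0 <= s <= len(nums) and -1 <= e <= len(nums)-1,
-- and additionally, when nums contains no zero, any endpoints on which both Pythons return (both then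
-- return 0 for every such query).  Excluded while A still returns: (a) negative / wrapped endpoints with a
-- zero present, where A's prefix-table lookup and B's scan both hit Python's negative-index wraparound and
-- return accidental, unspecifiable values; (b) endpoints where B's scan itself raises IndexError while A's
-- wrapped table lookup returns.  Endpoints past those ranges make A raise IndexError on prefix_sum.
def Pre_zeros_in_segments (nums : List Int) (segments : List (Int × Int)) : Prop :=
  ∀ se ∈ segments,
    (0 ≤ se.1 ∧ se.1 ≤ (nums.length : Int) ∧ 0 ≤ se.2 + 1 ∧ se.2 + 1 ≤ (nums.length : Int)) ∨
    ((0 : Int) ∉ nums ∧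
      -((nums.length : Int) + 1) ≤ se.1 ∧ se.1 ≤ (nums.length : Int) ∧
      -((nums.length : Int) + 1) ≤ se.2 + 1 ∧ se.2 + 1 ≤ (nums.length : Int) ∧
      (se.2 < se.1 ∨ (-(nums.length : Int) ≤ se.1 ∧ se.2 < (nums.length : Int))))
instance (nums : List Int) (segments : List (Int × Int)) : Decidable (Pre_zeros_in_segments nums segments) := by unfold Pre_zeros_in_segments; infer_instance
def pvWitness_zeros_in_segments : List Int × (List (Int × Int)) := ([0, 1, 0], [(0, 2), (1, 1), (2, 2)])

-- On segments with s > e+1 (inverted queries) A returns the negative prefix difference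
-- -(number of zeros at indices e+1..s-1) while B returns 0, the intended count for an empty segment.
def D_zeros_in_segments (nums : List Int) (segments : List (Int × Int)) : Prop :=
  ∃ se ∈ segments, se.2 + 1 < se.1 ∧
    ∃ k ∈ List.range nums.length, se.2 + 1 ≤ (k : Int) ∧ (k : Int) < se.1 ∧ nums.getD k 1 = 0
instance (nums : List Int) (segments : List (Int × Int)) : Decidable (D_zeros_in_segments nums segments) := by unfold D_zeros_in_segments; infer_instance

def Spec_zeros_in_segments (nums : List Int) (segments : List (Int × Int)) (out : List Int) : Prop :=
  ¬ D_zeros_in_segments nums segments → out = zeros_in_segments_alt nums segments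
instance (nums : List Int) (segments : List (Int × Int)) (out : List Int) : Decidable (Spec_zeros_in_segments nums segments out) := by unfold Spec_zeros_in_segments; infer_instance

def pvDiffWitness_zeros_in_segments : List Int × (List (Int × Int)) := ([0], [(1, -1)])
def pvDiffWitnessOut_zeros_in_segments : (List Int) × (List Int) := ([-1], [0])

-- ===== CLAIM (what is proved, stated in full; the proofs are below) =====
def Claim_unchanged_zeros_in_segments : Prop := ∀ (nums : List Int) (segments : List (Int × Int)), Dom_zeros_in_segments nums segments → Pre_zeros_in_segments nums segments → Spec_zeros_in_segments nums segments (zeros_in_segments nums segments)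
def Claim_changed_zeros_in_segments : Prop := Dom_zeros_in_segments (pvDiffWitness_zeros_in_segments.1) (pvDiffWitness_zeros_in_segments.2) ∧ Pre_zeros_in_segments (pvDiffWitness_zeros_in_segments.1) (pvDiffWitness_zeros_in_segments.2) ∧ D_zeros_in_segments (pvDiffWitness_zeros_in_segments.1) (pvDiffWitness_zeros_in_segments.2) ∧ zeros_in_segments (pvDiffWitness_zeros_in_segments.1) (pvDiffWitness_zeros_in_segments.2) = pvDiffWitnessOut_zeros_in_segments.1 ∧ zeros_in_segments_alt (pvDiffWitness_zeros_in_segments.1) (pvDiffWitness_zeros_in_segments.2) = pvDiffWitnessOut_zeros_in_segments.2 ∧ pvDiffWitnessOut_zeros_in_segments.1 ≠ pvDiffWitnessOut_zeros_in_segments.2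
def Claim_exact_zeros_in_segments : Prop := ∀ (nums : List Int) (segments : List (Int × Int)), Dom_zeros_in_segments nums segments → Pre_zeros_in_segments nums segments → D_zeros_in_segments nums segments → zeros_in_segments nums segments ≠ zeros_in_segments_alt nums segments

-- ===== LEMMAS AND PROOFS =====

-- Z nums k = number of zeros among the first k elements of nums (as an Int)
def Z (nums : List Int) (k : Nat) : Int := ((nums.take k).countP (fun x => x == 0) : Int)

theorem Z_zero (nums : List Int) : Z nums 0 = 0 := by simp [Z]

theorem Z_succ (nums : List Int) (k : Nat) (hk : k < nums.length) :
    Z nums (k + 1) = Z nums k + (if nums[k] = 0 then 1 else 0) := by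
  have h : nums.take (k + 1) = nums.take k ++ [nums[k]] := by
    rw [List.take_add_one, List.getElem?_eq_getElem hk]
    rfl
  rw [Z, Z, h, List.countP_append, List.countP_singleton]
  by_cases hz : nums[k] = 0 <;> simp [hz]

theorem Z_mono (nums : List Int) {a b : Nat} (h : a ≤ b) : Z nums a ≤ Z nums b := by
  have hsub : List.Sublist (nums.take a) (nums.take b) := by
    have heq : nums.take a = (nums.take b).take a := by
      rw [List.take_take, min_eq_left h]
    rw [heq]
    exact List.take_sublist _ _
  simpa [Z] using Int.ofNat_le.mpr (hsub.countP_le)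

theorem Z_const (nums : List Int) {a b : Nat} (hab : a ≤ b) (hb : b ≤ nums.length)
    (h : ∀ k : Nat, a ≤ k → k < b → nums.getD k 1 ≠ 0) : Z nums a = Z nums b := by
  induction b with
  | zero =>
    have ha : a = 0 := by omega
    rw [ha]
  | succ b ih =>
    rcases Nat.lt_or_ge a (b + 1) with hlt | hge
    · have hab' : a ≤ b := by omega
      have hz := h b hab' (Nat.lt_succ_self b)
      rw [List.getD_eq_getElem nums 1 (by omega)] at hz
      rw [Z_succ nums b (by omega), if_neg hz, add_zero]
      exact ih hab' (by omega) (fun k h1 h2 => h k h1 (by omega))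
    · have ha : a = b + 1 := by omega
      rw [ha]

theorem Z_strict (nums : List Int) {a b k : Nat} (ha : a ≤ k) (hb : k < b) (hbn : b ≤ nums.length)
    (hz : nums.getD k 1 = 0) : Z nums a < Z nums b := by
  have h1 : Z nums a ≤ Z nums k := Z_mono nums ha
  have h2 : Z nums (k + 1) ≤ Z nums b := Z_mono nums hb
  have hz' : nums[k]'(by omega) = 0 := by
    rw [List.getD_eq_getElem nums 1 (by omega)] at hz
    exact hz
  have h3 : Z nums (k + 1) = Z nums k + 1 := by
    rw [Z_succ nums k (by omega), if_pos hz']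
  omega

-- the prefix_sum fill loop of A's port, named so the invariant can speak about it
def stepA (nums : List Int) (p : List Int) (i : Int) : List Int :=
  PySem.List.pySetD p (i + 1)
    (PySem.List.pyGetD p i 0 + (if PySem.List.pyGetD nums i 0 == 0 then 1 else 0))

-- invariant of the fill loop: after processing range(m), entries 0..m hold Z and the length is n+1
theorem fill_inv (nums : List Int) (m : Nat) (hm : m ≤ nums.length) :
    ((PySem.List.pyRange 0 (m : Int) 1).foldl (stepA nums)
        (PySem.List.pyRepeat [0] ((nums.length : Int) + 1))).length = nums.length + 1 ∧
    ∀ k : Nat, k ≤ m →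
      ((PySem.List.pyRange 0 (m : Int) 1).foldl (stepA nums)
        (PySem.List.pyRepeat [0] ((nums.length : Int) + 1))).getD k 0 = Z nums k := by
  have hrep : PySem.List.pyRepeat [(0 : Int)] ((nums.length : Int) + 1)
      = List.replicate (nums.length + 1) 0 := by
    rw [PySem.List.pyRepeat_singleton,
      (by omega : ((nums.length : Int) + 1).toNat = nums.length + 1)]
  induction m with
  | zero =>
    rw [PySem.List.pyRange_one_eq_nil (by omega), List.foldl_nil, hrep]
    refine ⟨by simp, ?_⟩
    intro k hk
    have hk0 : k = 0 := by omega
    rw [hk0, Z_zero, List.replicate_succ]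
    rfl
  | succ m ih =>
    obtain ⟨ihlen, ihval⟩ := ih (by omega)
    have hsplit : PySem.List.pyRange 0 ((m + 1 : Nat) : Int) 1
        = PySem.List.pyRange 0 (m : Int) 1 ++ [(m : Int)] := by
      push_cast
      exact PySem.List.pyRange_one_succ_right (by omega)
    rw [hsplit, List.foldl_append]
    set P := (PySem.List.pyRange 0 (m : Int) 1).foldl (stepA nums)
      (PySem.List.pyRepeat [0] ((nums.length : Int) + 1)) with hP
    have hstep : List.foldl (stepA nums) P [(m : Int)]
        = P.set (m + 1) (Z nums m + (if nums[m]'(by omega) = 0 then 1 else 0)) := by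
      show stepA nums P (m : Int) = _
      unfold stepA
      have h1 : PySem.List.pyGetD P (m : Int) 0 = Z nums m := by
        rw [PySem.List.pyGetD_natCast]
        exact ihval m (by omega)
      have h2 : PySem.List.pyGetD nums (m : Int) 0 = nums[m]'(by omega) := by
        rw [PySem.List.pyGetD_natCast]
        exact List.getD_eq_getElem nums 0 (by omega)
      have h3 : (m : Int) + 1 = ((m + 1 : Nat) : Int) := by push_cast; ring
      rw [h1, h2, h3, PySem.List.pySetD_natCast]
      congr 1
      simp [beq_iff_eq]
    rw [hstep]
    refine ⟨by simp [ihlen], ?_⟩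
    intro k hk
    rcases Nat.lt_or_ge k (m + 1) with hlt | hge
    · rw [List.getD_eq_getElem?_getD, List.getElem?_set_ne (by omega),
        ← List.getD_eq_getElem?_getD]
      exact ihval k (by omega)
    · have hk1 : k = m + 1 := by omega
      rw [hk1, List.getD_eq_getElem?_getD,
        List.getElem?_set_self (by rw [ihlen]; omega), Option.getD_some,
        Z_succ nums m (by omega)]

-- the value A appends for one segment, under Pre_
theorem A_entry (nums : List Int) (s e : Int)
    (hs0 : 0 ≤ s) (hsn : s ≤ (nums.length : Int)) (he0 : 0 ≤ e + 1) (hen : e + 1 ≤ (nums.length : Int)) :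
    PySem.List.pyGetD ((PySem.List.pyRange 0 (nums.length : Int) 1).foldl (stepA nums)
        (PySem.List.pyRepeat [0] ((nums.length : Int) + 1))) (e + 1) 0
      - PySem.List.pyGetD ((PySem.List.pyRange 0 (nums.length : Int) 1).foldl (stepA nums)
        (PySem.List.pyRepeat [0] ((nums.length : Int) + 1))) s 0
      = Z nums (e + 1).toNat - Z nums s.toNat := by
  obtain ⟨hlen, hval⟩ := fill_inv nums nums.length (le_refl _)
  rw [PySem.List.pyGetD_eq_getElem _ 0 he0 (by omega),
    PySem.List.pyGetD_eq_getElem _ 0 hs0 (by omega),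
    ← List.getD_eq_getElem _ 0 (by omega), ← List.getD_eq_getElem _ 0 (by omega),
    hval (e + 1).toNat (by omega), hval s.toNat (by omega)]

-- the value B computes for one segment: a counting scan over range(s, s+d)
theorem B_scan (nums : List Int) (s : Int) (d : Nat) (hs0 : 0 ≤ s) (hdn : s + d ≤ (nums.length : Int)) :
    (PySem.List.pyRange s (s + (d : Int)) 1).foldl
        (fun c i => c + (if PySem.List.pyGetD nums i 1 == 0 then 1 else 0)) 0
      = Z nums (s + (d : Int)).toNat - Z nums s.toNat := by
  induction d with
  | zero =>
    rw [(by omega : s + ((0 : Nat) : Int) = s), PySem.List.pyRange_one_eq_nil (by omega)]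
    simp
  | succ d ih =>
    have hsd : s + (((d + 1 : Nat)) : Int) = (s + (d : Int)) + 1 := by push_cast; ring
    rw [hsd, PySem.List.pyRange_one_succ_right (by omega), List.foldl_append,
      ih (by push_cast at hdn ⊢; omega)]
    show _ + (if PySem.List.pyGetD nums (s + (d : Int)) 1 == 0 then 1 else 0) = _
    have hkn : (s + (d : Int)).toNat < nums.length := by push_cast at hdn; omega
    rw [PySem.List.pyGetD_eq_getElem nums 1 (by omega) (by omega)]
    have htn : ((s + (d : Int)) + 1).toNat = (s + (d : Int)).toNat + 1 := by omega
    rw [htn, Z_succ nums _ hkn]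
    simp only [beq_iff_eq]
    split_ifs <;> ring

-- A's output is a map over the segments
theorem A_eq_map (nums : List Int) (segments : List (Int × Int)) :
    zeros_in_segments nums segments
      = segments.map (fun se =>
          PySem.List.pyGetD ((PySem.List.pyRange 0 (nums.length : Int) 1).foldl (stepA nums)
            (PySem.List.pyRepeat [0] ((nums.length : Int) + 1))) (se.2 + 1) 0
          - PySem.List.pyGetD ((PySem.List.pyRange 0 (nums.length : Int) 1).foldl (stepA nums)
            (PySem.List.pyRepeat [0] ((nums.length : Int) + 1))) se.1 0) := by
  unfold zeros_in_segments
  rw [show (fun (p : List Int) (i : Int) =>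
        PySem.List.pySetD p (i + 1)
          (PySem.List.pyGetD p i 0 + (if PySem.List.pyGetD nums i 0 == 0 then 1 else 0)))
      = stepA nums from rfl]
  exact PySem.List.foldl_append_singleton_eq_map _ _ _

-- the per-segment values agree under Pre_ for a segment outside the changed region
theorem entry_eq (nums : List Int) (s e : Int)
    (hs0 : 0 ≤ s) (hsn : s ≤ (nums.length : Int)) (he0 : 0 ≤ e + 1) (hen : e + 1 ≤ (nums.length : Int))
    (hnd : ¬ (e + 1 < s ∧ ∃ k ∈ List.range nums.length, e + 1 ≤ (k : Int) ∧ (k : Int) < s ∧ nums.getD k 1 = 0)) :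
    PySem.List.pyGetD ((PySem.List.pyRange 0 (nums.length : Int) 1).foldl (stepA nums)
        (PySem.List.pyRepeat [0] ((nums.length : Int) + 1))) (e + 1) 0
      - PySem.List.pyGetD ((PySem.List.pyRange 0 (nums.length : Int) 1).foldl (stepA nums)
        (PySem.List.pyRepeat [0] ((nums.length : Int) + 1))) s 0
      = (PySem.List.pyRange s (e + 1) 1).foldl
          (fun c i => c + (if PySem.List.pyGetD nums i 1 == 0 then 1 else 0)) 0 := by
  rw [A_entry nums s e hs0 hsn he0 hen]
  by_cases hle : s ≤ e + 1
  · -- normal segment: B scans exactly the indices s..e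
    have hd : e + 1 = s + (((e + 1 - s).toNat : Nat) : Int) := by omega
    rw [hd, B_scan nums s (e + 1 - s).toNat hs0 (by omega)]
  · -- inverted segment with no zero in nums[e+1:s]: both sides are 0
    have hlt : e + 1 < s := by omega
    rw [PySem.List.pyRange_one_eq_nil (by omega)]
    simp only [List.foldl_nil]
    have hzc : Z nums (e + 1).toNat = Z nums s.toNat := by
      apply Z_const nums (by omega) (by omega)
      intro k hk1 hk2 hzk
      apply hnd
      refine ⟨hlt, k, ?_, by omega, by omega, hzk⟩
      simp only [List.mem_range]
      omega
    omega

-- when nums contains no zero, every prefix count is 0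
theorem nozero_Z (nums : List Int) (h : (0 : Int) ∉ nums) (k : Nat) : Z nums k = 0 := by
  rw [Z]
  norm_cast
  rw [List.countP_eq_zero]
  intro a ha
  simp only [beq_iff_eq]
  intro ha0
  exact h (ha0 ▸ List.mem_of_mem_take ha)

-- when nums contains no zero, every entry of the filled prefix table is 0
theorem P_all_zero (nums : List Int) (h : (0 : Int) ∉ nums) :
    ∀ x ∈ (PySem.List.pyRange 0 (nums.length : Int) 1).foldl (stepA nums)
      (PySem.List.pyRepeat [0] ((nums.length : Int) + 1)), x = 0 := by
  obtain ⟨hlen, hval⟩ := fill_inv nums nums.length (le_refl _)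
  intro x hx
  obtain ⟨k, hk, hkx⟩ := List.mem_iff_getElem.mp hx
  have h1 := hval k (by omega)
  rw [List.getD_eq_getElem _ 0 hk, hkx] at h1
  rw [h1, nozero_Z nums h]

theorem pyGetD_zero_of_all (l : List Int) (i : Int) (h : ∀ x ∈ l, x = 0) :
    PySem.List.pyGetD l i 0 = 0 := by
  show (PySem.List.pyGet? l i).getD 0 = 0
  cases hg : PySem.List.pyGet? l i with
  | none => rfl
  | some x => simpa using h x (PySem.List.mem_of_pyGet?_eq_some l hg)

-- when nums contains no zero, B's counting scan adds nothing
theorem B_scan_nozero (nums : List Int) (h : (0 : Int) ∉ nums) (l : List Int) (c0 : Int) :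
    l.foldl (fun c i => c + (if PySem.List.pyGetD nums i 1 == 0 then 1 else 0)) c0 = c0 := by
  induction l generalizing c0 with
  | nil => rfl
  | cons i l ih =>
    have hne : PySem.List.pyGetD nums i 1 ≠ 0 := by
      show (PySem.List.pyGet? nums i).getD 1 ≠ 0
      cases hg : PySem.List.pyGet? nums i with
      | none => simp
      | some x =>
        simp only [Option.getD_some]
        intro hx
        exact h (hx ▸ PySem.List.mem_of_pyGet?_eq_some nums hg)
    rw [List.foldl_cons,
      if_neg (show ¬((PySem.List.pyGetD nums i 1 == 0) = true) by simpa [beq_iff_eq] using hne),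
      add_zero]
    exact ih c0

-- the per-segment values also agree whenever nums contains no zero: both are 0
theorem entry_eq_nozero (nums : List Int) (s e : Int) (hnz : (0 : Int) ∉ nums) :
    PySem.List.pyGetD ((PySem.List.pyRange 0 (nums.length : Int) 1).foldl (stepA nums)
        (PySem.List.pyRepeat [0] ((nums.length : Int) + 1))) (e + 1) 0
      - PySem.List.pyGetD ((PySem.List.pyRange 0 (nums.length : Int) 1).foldl (stepA nums)
        (PySem.List.pyRepeat [0] ((nums.length : Int) + 1))) s 0
      = (PySem.List.pyRange s (e + 1) 1).foldl
          (fun c i => c + (if PySem.List.pyGetD nums i 1 == 0 then 1 else 0)) 0 := by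
  have hall := P_all_zero nums hnz
  rw [pyGetD_zero_of_all _ _ hall, pyGetD_zero_of_all _ _ hall, B_scan_nozero nums hnz]
  ring

-- ===== VERDICT (by name: the statement is the Claim_ definition above) =====
theorem zeros_in_segments_spec : Claim_unchanged_zeros_in_segments := by
  intro nums segments _ hpre hnd
  rw [A_eq_map]
  unfold zeros_in_segments_alt
  apply List.map_congr_left
  intro se hse
  rcases hpre se hse with ⟨hs0, hsn, he0, hen⟩ | ⟨hnz, _⟩
  · apply entry_eq nums se.1 se.2 hs0 hsn he0 hen
    intro ⟨h1, h2⟩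
    exact hnd ⟨se, hse, h1, h2⟩
  · exact entry_eq_nozero nums se.1 se.2 hnz

theorem zeros_in_segments_changed : Claim_changed_zeros_in_segments := by
  unfold Claim_changed_zeros_in_segments; decide

theorem zeros_in_segments_tight : Claim_exact_zeros_in_segments := by
  intro nums segments _ hpre hd heq
  obtain ⟨se, hse, hlt, k, hk, hk1, hk2, hkz⟩ := hd
  rw [A_eq_map] at heq
  unfold zeros_in_segments_alt at heq
  rw [List.map_eq_map_iff] at heq
  have hent := heq se hse
  have hkn : k < nums.length := by simpa using hk
  have hmem : (0 : Int) ∈ nums := by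
    rw [List.getD_eq_getElem nums 1 hkn] at hkz
    exact hkz ▸ List.getElem_mem hkn
  rcases hpre se hse with ⟨hs0, hsn, he0, hen⟩ | ⟨hnz, _⟩
  swap
  · exact hnz hmem
  rw [A_entry nums se.1 se.2 hs0 hsn he0 hen,
    PySem.List.pyRange_one_eq_nil (by omega)] at hent
  simp only [List.foldl_nil] at hent
  have hstrict : Z nums (se.2 + 1).toNat < Z nums se.1.toNat :=
    Z_strict nums (a := (se.2 + 1).toNat) (b := se.1.toNat) (k := k)
      (by omega) (by omega) (by omega) hkz
  omega
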